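/-
  WHAT EVERY UNIT STATEMENT OF THE stb_vorbis PROOF SHARES (the statements themselves: Vorbis/Spec/Units/*.lean, generated by
  farm/mkstatement.py; the `Spec` of each function: Vorbis/Spec/<Group>.lean).

      WayInv                 THE INVARIANT OF THE WAY: the machine is not at `__asan_report`, and RIP is inside the image's text
                             (`Vorbis.VorbisStaysInCode`, Vorbis/Statement.lean, is about exactly this invariant: `wayInv_iff`)
      CodeOK u₀ m            "the image's text is unchanged": `m` agrees with the memory of the REFERENCE STATE `u₀` on
                             `[L.textLo, L.textHi)`. `u₀` is a variable of every statement (in the end: the start state), and the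
                             bytes of the function a unit is about are a hypothesis about `u₀` (`HasCodeNat L u₀ entry code.nat size`).
                             `CodeOK u₀` is the `codeOK` premise of every `SmallCheck`, and it is the walker's own `w_eq` hypothesis
      conv u₀                THE CALLING CONVENTION of the program (`User.Conv`): code = the text as it is in `u₀` (`Code.ofMem`:
                             `(conv u₀).code.In m ↔ CodeOK u₀ m`), stack region `[700000H, 800000H)`, invariant of every function
                             boundary `abiInv` (DF = 0, the SSE exception masks set)
      LiveIn others frames a n      the design documents' `Live(a, n)`: the `n` bytes at `a` lie inside ONE live object; `LiveIn.where_`: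
                             where such a range is (data space, off the text, off the stack below `top`), as one arithmetic fact
      ShadowPre others frames u     the shadow clause of a contract's pre: `ShadowInv others frames (rsp + 8) u.mem` (`.inv`) and no object of
                             `others` in the image's text (`.offText`). The post of an UNPROTECTED function that calls no shadow writer
                             (107 of the 116) says `ShadowUntouched u.mem v.mem` (SH8), from which the layer follows again (`ShadowPre.post`)
      check_small / check_small_other / LiveIn.accSmall
                             HOW A `check_<addr>` GOAL IS CLOSED: the bytes lie inside a live object of the invariant at the
                             function's entry, and no store since has touched the shadow (`v_untouched`)
      stack_has, byte_of_part32, readLE_stored_byte32, toNat_ofBV32, toNat_part32      small facts every walk meets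
      v_entry he             the first line of a unit's proof: `AtEntry`'s fields as hypotheses in the form the walker and `u_omega`
                             read (`he_room` … as numbers, `he_eq` the code span, `he_stack` the whole stack's `Lay.Has`, `he_df he_mx he_sse`)
      v_side                 the side tactic of `u_walk` in this tree (`u_omega` after `vspec` and the convention are unfolded)
      v_inv, v_returned, v_untouched      the `inv` field of a callee's `AtEntry` / of `Returned`; the function's own `Returned`; "no store
                             went to the shadow"

  A STATEMENT (generated: farm/mkstatement.py) quantifies over `Lay : Layout` with `Lay.hi = 0x1000000` (the layout of the start state:
  user region [100000H, 1000000H); a VARIABLE, so that `u_omega` reads `Lay.Has`), `μ` with `UserX.MicroOK μ`, the reference state `u₀`,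
  `HasCodeNat Lay u₀ L.f.entry code_f.nat L.f.size`, the callees' contracts, and concludes
  `∀ ghosts, Calls Lay μ WayInv (conv u₀) L.f.entry (f.spec ghosts)`. Every code address is a label of Vorbis/Labels.lean.
-/
import Vorbis.Spec.Attr
import Vorbis.Labels
import Vorbis.Code
import Vorbis.Dec.All
import Vorbis.Symbols
import Vorbis.Statement
import Vorbis.Globals
import Vorbis.Frames
import Asan.Runtime
import Asan.Check
import Asan.CheckWalk
import UserX.SseStep
import UserX.Loop
import UserX.Call
import UserX.CallAt
import UserX.FrameTac
namespace Vorbis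
open X86 X86.User Asan

/-! ### The invariant of the way, the code, the convention -/

/-- **The invariant of the way** of every contract of the proof: the machine is not at `__asan_report`, and RIP is inside the
text of the image. `u_walk` discharges it at every step by evaluation (RIP is a numeral there). -/
abbrev WayInv : State → Prop :=
  fun v => v.rip ≠ L.report ∧ L.textLo ≤ v.rip.toNat ∧ v.rip.toNat < L.textHi

/-- `WayInv` is the invariant `Vorbis.VorbisStaysInCode.of_reachVia` asks for, for the image of this build. -/
theorem wayInv_iff (bytes : Array UInt8) (v : State) :
    WayInv v ↔ (v.rip ≠ (symbols.image bytes).report ∧ InText (symbols.image bytes) v.rip) :=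
  Iff.rfl

/-- **The image's text is unchanged**: the memory `m` agrees with the memory of the reference state `u₀` on the text. -/
abbrev CodeOK (u₀ : State) : Mem → Prop :=
  fun m => Mem.EqOn L.textLo L.textHi u₀.mem m

/-- **The calling convention of the program**: the code is the text as it is in the reference state `u₀`, the stack region is
`[700000H, 800000H)`, the invariant of every function boundary is the ABI's (DF = 0, SSE exceptions masked). -/
def conv (u₀ : State) : Conv where
  code := Code.ofMem u₀.mem L.textLo (L.textHi - L.textLo)
  stackLo := 0x700000
  stackHi := 0x800000
  inv := abiInv

@[simp] theorem conv_stackLo (u₀ : State) : (conv u₀).stackLo = 0x700000 := id rfl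
@[simp] theorem conv_stackHi (u₀ : State) : (conv u₀).stackHi = 0x800000 := id rfl
@[simp] theorem conv_inv (u₀ : State) : (conv u₀).inv = abiInv := id rfl

/-- The convention's code is in `m` exactly when the text of `m` is that of the reference state. -/
theorem conv_code_iff (u₀ : State) (m : Mem) : (conv u₀).code.In m ↔ CodeOK u₀ m :=
  Code.ofMem_in_iff (m₀ := u₀.mem) (m := m) (lo := L.textLo) (len := L.textHi - L.textLo) (by decide)

/-- The `code` field of a callee's `AtEntry` / of the function's own `Returned`, from the walker's `w_eq`. -/
theorem conv_code_in {u₀ : State} {m : Mem} (h : Mem.EqOn L.textLo L.textHi u₀.mem m) : (conv u₀).code.In m :=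
  (conv_code_iff u₀ m).mpr h

/-- The walker's span fact at the function's entry, from `AtEntry.code`. -/
theorem conv_code_eqOn {u₀ : State} {m : Mem} (h : (conv u₀).code.In m) : Mem.EqOn L.textLo L.textHi u₀.mem m :=
  (conv_code_iff u₀ m).mp h

/-- The ABI invariant gives the stepper's `SseOK`. -/
theorem sseOK_of_abiInv {u : State} (h : abiInv u) : SseOK u :=
  ⟨h.2⟩

/-- … and back: DF and the MXCSR masks of a state whose flags' DF and MXCSR masks are known. -/
theorem abiInv_of {u : State} (hdf : u.flags .df = false) (hmx : u.mxcsr &&& 0x1F80 = 0x1F80) : abiInv u :=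
  ⟨hdf, hmx⟩

/-! ### Live objects; the shadow clause of an unprotected function -/

/-- **`Live(a, n)`** of the design documents: the `n` bytes at `a` lie inside ONE live object — a stack object of an active
protected frame, or one of `others` (globals, input, output, arena blocks). -/
def LiveIn (others : List Obj) (frames : List (Nat × FrameLayout)) (a n : Nat) : Prop :=
  ∃ o, o ∈ stackObjs frames ++ others ∧ o.base ≤ a ∧ a + n ≤ o.base + o.size

/-- **The shadow clause of a contract's precondition**: the shadow layer holds at the entry state, with the clean stack ending
at the caller's stack pointer (`rsp + 8`: the slot of the return address is part of the clean region); and no live object lies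
in the image's text (the live objects are the registered globals — `.rodata`, `.data`, `.bss`, all above the text —, the input,
the output, arena blocks and stack objects), so that a checked store never touches the code. -/
structure ShadowPre (others : List Obj) (frames : List (Nat × FrameLayout)) (u : State) : Prop where
  inv : ShadowInv others frames ((u.reg .rsp).toNat + 8) u.mem
  offText : ∀ o, o ∈ others → L.textHi ≤ o.base

namespace LiveIn
variable {others : List Obj} {frames : List (Nat × FrameLayout)} {top a n : Nat} {mem : Mem}

/-- A sub-range of a live range. -/
theorem sub (h : LiveIn others frames a n) (b k : Nat) (h1 : a ≤ b) (h2 : b + k ≤ a + n) : LiveIn others frames b k := by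
  obtain ⟨o, ho, k1, k2⟩ := h
  exact ⟨o, ho, by omega, by omega⟩

/-- A live range lies in the data space `[100000H, C00000H)`. -/
theorem inside (h : LiveIn others frames a n) (hinv : ShadowInv others frames top mem) (hn : 0 < n) :
    0x100000 ≤ a ∧ a + n ≤ 0xC00000 := by
  obtain ⟨o, ho, k1, k2⟩ := h
  have := hinv.shadow.inside ho (by omega)
  omega

/-- **A live range does not meet the stack below `top`** (the function's own frame and everything it pushes): a stack object
lies in an active frame, at or above `top`; every other object is off the stack region. -/
theorem above (h : LiveIn others frames a n) (hinv : ShadowInv others frames top mem) :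
    top ≤ a ∨ a + n ≤ 0x700000 ∨ 0x800000 ≤ a := by
  obtain ⟨o, ho, k1, k2⟩ := h
  rcases List.mem_append.mp ho with hs | hoth
  · obtain ⟨bF, hbF, g1, g2⟩ := ShadowInv.stackObj_gran hinv.stack hs
    obtain ⟨_, a8, atop, _, _⟩ := hinv.stack.active bF hbF
    have : o.gLo = o.base / 8 := rfl
    left
    omega
  · have := hinv.off o hoth
    unfold OffStack at this
    omega

/-- **A live range does not meet the image's text.** -/
theorem offText (h : LiveIn others frames a n) (hinv : ShadowInv others frames top mem)
    (hoff : ∀ o, o ∈ others → L.textHi ≤ o.base) : L.textHi ≤ a := by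
  obtain ⟨o, ho, k1, k2⟩ := h
  rcases List.mem_append.mp ho with hs | hoth
  · obtain ⟨bF, hbF, g1, g2⟩ := ShadowInv.stackObj_gran hinv.stack hs
    obtain ⟨_, a8, atop, _, _⟩ := hinv.stack.active bF hbF
    have hlo := hinv.stack.lo
    have : o.gLo = o.base / 8 := rfl
    have e : L.textHi = 0x119d40 := rfl
    omega
  · have := hoff o hoth
    omega

/-- **Everything a walk needs to know about where a live range is**, as one arithmetic fact for `u_omega`: inside the data
space, off the image's text, off the stack below `top`. (`n = 0`: nothing is known, nothing is accessed.) -/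
theorem where_ (h : LiveIn others frames a n) (hinv : ShadowInv others frames top mem)
    (hoff : ∀ o, o ∈ others → L.textHi ≤ o.base) (hn : 0 < n) :
    0x119d40 ≤ a ∧ a + n ≤ 0xC00000 ∧ (top ≤ a ∨ a + n ≤ 0x700000 ∨ 0x800000 ≤ a) := by
  have h1 := h.inside hinv hn
  have h2 := h.above hinv
  have h3 : L.textHi ≤ a := h.offText hinv hoff
  have e : L.textHi = 0x119d40 := rfl
  omega

/-- The small check of bytes inside a live range passes, in any memory whose shadow is that of the invariant's. -/
theorem accSmall (h : LiveIn others frames a n) (hinv : ShadowInv others frames top mem) {mem' : Mem}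
    (hun : ShadowUntouched mem mem') (b : Word) (k : Nat) (hk : 1 ≤ k) (h1 : a ≤ b.toNat) (h2 : b.toNat + k ≤ a + n) :
    AccSmall k mem' b := by
  obtain ⟨o, ho, k1, k2⟩ := h
  have hinv' := hinv.untouched hun
  exact ⟨hinv'.sealed, Obj.accSmall_of_obj (hinv'.shadow.obj ho) (by omega) (by omega) hk⟩

end LiveIn

/-- **A `check_<addr>` goal, K = 1, 2, 4, 8**: the `k` bytes at `b` lie inside the live object `o` of the shadow invariant
`hinv` (of the function's entry memory `mem`), and the memory at the check site has the same shadow (`hun`: no store of the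
function went to the shadow — `by u_eqon`). -/
theorem check_small {others : List Obj} {frames : List (Nat × FrameLayout)} {top : Nat} {mem mem' : Mem}
    (hinv : ShadowInv others frames top mem) (hun : ShadowUntouched mem mem') {o : Obj}
    (ho : o ∈ stackObjs frames ++ others) {b : Word} {k : Nat} (hk : 1 ≤ k) (h1 : o.base ≤ b.toNat)
    (h2 : b.toNat + k ≤ o.base + o.size) : AccSmall k mem' b := by
  have hinv' := hinv.untouched hun
  exact ⟨hinv'.sealed, Obj.accSmall_of_obj (hinv'.shadow.obj ho) h1 h2 hk⟩

/-- The same for an object of `others` (a global, the input, the output, an arena block, `*f`). -/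
theorem check_small_other {others : List Obj} {frames : List (Nat × FrameLayout)} {top : Nat} {mem mem' : Mem}
    (hinv : ShadowInv others frames top mem) (hun : ShadowUntouched mem mem') {o : Obj} (ho : o ∈ others) {b : Word} {k : Nat}
    (hk : 1 ≤ k) (h1 : o.base ≤ b.toNat) (h2 : b.toNat + k ≤ o.base + o.size) : AccSmall k mem' b :=
  check_small hinv hun (List.mem_append_right _ ho) hk h1 h2

/-- **The shadow clause of the postcondition of an unprotected function** (SH8, `ShadowUntouched`) gives the layer back at the
returned state: same objects, same frames, the clean stack ends at the caller's stack pointer again. -/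
theorem ShadowPre.post {others : List Obj} {frames : List (Nat × FrameLayout)} {u v : State}
    (h : ShadowPre others frames u) (hun : ShadowUntouched u.mem v.mem) (hrsp : v.reg .rsp = u.reg .rsp + 8) :
    ShadowInv others frames (v.reg .rsp).toNat v.mem := by
  have hhi := h.inv.stack.hi
  have e : (v.reg .rsp).toNat = (u.reg .rsp).toNat + 8 := by
    rw [hrsp]
    exact toNat_add_ofNat (u.reg .rsp) 8 (by omega)
  rw [e]
  exact ShadowInv.untouched h.inv hun

/-- The stack pointer of a state with the shadow clause is a stack address: `700000H ≤ rsp + 8 ≤ 800000H`, 8-aligned. -/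
theorem ShadowPre.rsp {others : List Obj} {frames : List (Nat × FrameLayout)} {u : State} (h : ShadowPre others frames u) :
    0x700000 ≤ (u.reg .rsp).toNat + 8 ∧ (u.reg .rsp).toNat + 8 ≤ 0x800000 ∧ ((u.reg .rsp).toNat + 8) % 8 = 0 :=
  ⟨h.inv.stack.lo, h.inv.stack.hi, h.inv.stack.aligned⟩

/-- **The shadow clause at a callee's entry, from the caller's own** (the `pre_<addr>` goal of a call of an unprotected function
by an unprotected function): the callee is entered with a lower stack pointer — still 8-aligned and inside the stack region —
and no store of the caller so far went to the shadow (`by v_untouched`). -/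
theorem ShadowPre.callee {others : List Obj} {frames : List (Nat × FrameLayout)} {u v : State}
    (h : ShadowPre others frames u) (hun : ShadowUntouched u.mem v.mem)
    (hle : (v.reg .rsp).toNat ≤ (u.reg .rsp).toNat) (h8 : (v.reg .rsp).toNat % 8 = 0)
    (hlo : 0x700000 ≤ (v.reg .rsp).toNat + 8) : ShadowPre others frames v :=
  ⟨(h.inv.untouched hun).lower (by omega) (by omega) hlo, h.offText⟩

/-- The byte a `mov [m8], r8` stores from the low byte of a 32-bit register value: the register's value modulo 256. -/
theorem byte_of_part32 (x : Word) : (BitVec.setWidth 8 (Word.part .w32 x)).toNat = x.toNat % 256 := by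
  unfold Word.part
  simp only [Width.bits, BitVec.toNat_setWidth, UInt64.toNat_toBitVec]
  omega

/-- Reading back the byte that `mov [m8], r8` has just stored from a 32-bit register value. -/
theorem readLE_stored_byte32 (M : Mem) (a x : Word) :
    (M.writeLE a 1 (BitVec.setWidth 8 (Word.part .w32 x)).toNat).readLE a 1 = x.toNat % 256 := by
  rw [Mem.readLE_writeLE_same _ _ _ _ (by decide), byte_of_part32, Nat.pow_one, Nat.mod_mod]

/-- The value of a 32-bit result zero-extended into a register (`mov eax, …` writes rax). -/
theorem toNat_ofBV32 (x : BitVec 32) : (Word.ofBV x).toNat = x.toNat := by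
  unfold Word.ofBV
  simp only [UInt64.toNat_ofBitVec, BitVec.toNat_setWidth]
  omega

/-- The low half of a register, as a number. -/
theorem toNat_part32 (r : Word) : (Word.part .w32 r).toNat = r.toNat % 2 ^ 32 := by
  unfold Word.part
  simp only [Width.bits, BitVec.toNat_setWidth, UInt64.toNat_toBitVec]

/-! ### The layout of the proof -/

/-- **The function's stack is inside the user region**: the `k` bytes below the return address that the contract allows
(`AtEntry.room`: `700000H + k ≤ rsp`) and the slot of the return address (`AtEntry.top`: `rsp + 8 ≤ 800000H`). One range fact
for the whole frame: the walker finds every slot's `Lay.Has` in it, and reads a slot through the stores to the other slots. -/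
theorem stack_has {Lay : Layout} (hLay : Lay.hi = 0x1000000) {sp : Word} {k : Nat} (h1 : 0x700000 + k ≤ sp.toNat)
    (h2 : sp.toNat + 8 ≤ 0x800000) : Lay.Has (sp - UInt64.ofNat k) (k + 8) := by
  have hk : k < 2 ^ 64 := by omega
  have e : (sp - UInt64.ofNat k).toNat = sp.toNat - k := by
    have hle : (UInt64.ofNat k) ≤ sp := by
      rw [UInt64.le_iff_toNat_le, UInt64.toNat_ofNat', Nat.mod_eq_of_lt hk]
      omega
    rw [UInt64.toNat_sub_of_le _ _ hle, UInt64.toNat_ofNat', Nat.mod_eq_of_lt hk]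
  unfold Layout.Has Layout.lo
  rw [e, hLay]
  omega


/-- The user region of the start layout: `[100000H, 1000000H)` — every `L.Has a n` of a proof is arithmetic against these. -/
theorem startLayout_lo (c : Nat) (hc : c = 0 ∨ c = 3) : (startLayout c hc).lo = 0x100000 := by
  unfold startLayout Layout.lo
  rfl

end Vorbis

/-! ### The first and the last line of a unit's proof -/

/-- `v_side`: the side tactic of `u_walk` in this tree — `u_omega`, after the program's convention (`conv`: stack region) has
been unfolded in the goal and the frame sizes of the contracts (`vspec`) are numerals. -/
macro "v_side" : tactic => `(tactic| first
  | u_omega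
  | (simp only [vspec, Vorbis.conv_stackLo, Vorbis.conv_stackHi, Vorbis.conv_inv] <;> u_omega))

/-- `v_entry he`: opens `he : AtEntry (Vorbis.conv u₀) entry frame ret u` (as `u_entry`), then restates the fields the way the
walker and `u_omega` read them: `he_room`, `he_top` as numbers (the convention's stack region and the contract's frame size, `vspec`, unfolded), `he_eq : Mem.EqOn L.textLo L.textHi u₀.mem u.mem` (the code
span: what `u_walk … span [Vorbis.L.textLo, Vorbis.L.textHi]` looks for), `he_df`, `he_mx` (the two halves of `abiInv`) and
`he_sse : SseOK u` (what the SSE steps look for), `he_stack : Lay.Has (u.reg .rsp - frame) (frame + 8)` (the function's whole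
stack inside the user region, from `Lay.hi = 1000000H` in the context). The names are made from the hypothesis's name. -/
elab "v_entry " h:ident : tactic => do
  let base := h.getId
  let field (suffix : String) : Lean.Ident := Lean.mkIdent (base.appendAfter suffix)
  let room := field "_room"
  let top := field "_top"
  let code := field "_code"
  let inv := field "_inv"
  let eq := field "_eq"
  let df := field "_df"
  let mx := field "_mx"
  let sse := field "_sse"
  let stack := field "_stack"
  Lean.Elab.Tactic.evalTactic (← `(tactic| (
    u_entry $h
    simp only [vspec, Vorbis.conv_stackLo, Vorbis.conv_stackHi] at $room:ident $top:ident
    have $stack:ident := Vorbis.stack_has (by assumption) $room $top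
    try simp only [UInt64.reduceOfNat, Nat.reduceAdd, UInt64.sub_zero] at $stack:ident
    have $eq:ident := Vorbis.conv_code_eqOn $code
    have $df:ident := (show X86.User.abiInv _ from $inv).1
    have $mx:ident := (show X86.User.abiInv _ from $inv).2
    have $sse:ident := Vorbis.sseOK_of_abiInv $inv)))

/-- `v_inv`: the goal `(Vorbis.conv u₀).inv s` (= `abiInv s`: DF = 0 and the MXCSR masks) at a state the walker describes by
`w_flags : s.flags = (… .setStatus …)` and `w_mxcsr : s.mxcsr = …`: DF is not a status flag (`X86.User.df_setStatus`), and the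
facts about the state below (`he_df`, `he_mx` of `v_entry`; after a loop: what the invariant says of the head's DF; after an SSE
instruction: `hmx_<addr>`) are found by `with_reducible assumption` (instant; a bare `assumption` costs 4 – 12 s per stack-slot
hypothesis in the context: S2-8's repro) and, only if that fails, by `assumption` as before. -/
macro "v_inv" : tactic => `(tactic| (
  show X86.User.abiInv _
  refine Vorbis.abiInv_of ?_ ?_
  · first
      | with_reducible assumption
      | (rw [‹(_ : X86.User.State).flags = _›]
         try simp only [X86.User.df_setStatus]
         with_reducible assumption)
      | assumption
      | (rw [‹(_ : X86.User.State).flags = _›]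
         try simp only [X86.User.df_setStatus]
         assumption)
  · first
      | with_reducible assumption
      | (rw [‹(_ : X86.User.State).mxcsr = _›]
         with_reducible assumption)
      | assumption
      | (rw [‹(_ : X86.User.State).mxcsr = _›]
         assumption)))

/-- `v_returned`: the goal `Returned (Vorbis.conv u₀) spec u ret s` at the state after the function's `ret`, from the walker's
hypotheses (`w_rip`, `w_rsp`, `w_kept` + the restored registers, `w_mem`, `w_eq`, `w_flags`, `w_mxcsr`): `rip`, `rsp`, `saved`
(`u_saved`), `same` (`u_same` against the contract's footprint: `vspec` unfolds its frame size and windows), `code`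
(`Vorbis.conv_code_in w_eq`), `inv` (`v_inv`) are tried; a field that does not close is rotated behind the post: the goals
left are the POST FIRST, then the fields that did not close, in order. (Anonymous holes: a named hole `?inv` is already a goal
of the walker, and a named hole cannot be used twice in a proof — one `v_returned` per `ret` path.) -/
macro "v_returned" : tactic => `(tactic| (
  refine X86.User.Returned.mk ?_ ?_ ?_ ?_ ?_ ?_ ?_
  first | focus (with_reducible assumption) | rotate_left
  first | focus (first | (with_reducible assumption) | u_rsp_popped) | rotate_left
  first | focus u_saved | rotate_left
  first | focus (simp only [X86.User.Spec.footprint, vspec]; u_same) | rotate_left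
  first | focus (exact Vorbis.conv_code_in ‹_›) | rotate_left
  first | focus v_inv | rotate_left))

/-- `v_untouched`: the goal `ShadowUntouched u.mem s.mem` (no store went to the shadow region) for `s.mem` the walker's nest of
stores (`w_mem`), possibly over a loop head's or a callee's memory known by `Mem.SameExcept ws u.mem _`: one disjointness side
condition per store and per window, by `u_omega` (the stack is below 800000H, a live range below C00000H). -/
macro "v_untouched" : tactic => `(tactic| (
  unfold Asan.ShadowUntouched
  u_memnorm
  u_eqon))

set_option hygiene false in
/-- `v_after_call w_rsp_<addr> w_mem_<addr>`: the first line after a call that `u_walk` applied a contract to. The walk stopped at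
the returned state with `w_same`, `w_code`, `w_inv`, `w_post`; this restates them the way the next `u_walk` and the frame tactics
read them: `w_eq` (the code span, from `w_code`), `w_df`, `w_mx`, `w_sse` (the two halves of `abiInv` and `SseOK`, from `w_inv`),
and `w_same` with the callee's footprint as numbers over the caller's entry state (the contract's frame size and windows: `vspec`;
the callee's stack pointer: `w_rsp_<addr>`; the memory at the callee's entry: `w_mem_<addr>`). -/
macro "v_after_call " hrsp:ident hmem:ident : tactic => `(tactic| (
  have w_eq := Vorbis.conv_code_eqOn w_code
  have w_df := (show X86.User.abiInv _ from w_inv).1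
  have w_mx := (show X86.User.abiInv _ from w_inv).2
  have w_sse := Vorbis.sseOK_of_abiInv w_inv
  simp only [X86.User.Spec.footprint, vspec, $hrsp:ident] at w_same
  rw [$hmem:ident] at w_same))
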